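-- pv_equiv track=rewrite | github.com/dat-nguyenvn/DC12 | wildlive/utils/window_detect.py | generate_tile_centers_border_and_salient
-- ===== SOURCE A (Python) =====
-- def generate_tile_centers_border_and_salient(frame_width, frame_height, tile_width=640, tile_height=640):
--     centers = []
--     border_centers = []
--     salient_centers = []
--
--     # Compute the optimal overlap to balance coverage
--     num_tiles_x = (frame_width + tile_width - 1) // tile_width
--     num_tiles_y = (frame_height + tile_height - 1) // tile_height
--
--     step_x = (frame_width - tile_width) // max(num_tiles_x - 1, 1)
--     step_y = (frame_height - tile_height) // max(num_tiles_y - 1, 1)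
--
--     # Generate tile centers
--     for j in range(num_tiles_y):
--         for i in range(num_tiles_x):
--             x_center = min(tile_width // 2 + i * step_x, frame_width - tile_width // 2)
--             y_center = min(tile_height // 2 + j * step_y, frame_height - tile_height // 2)
--             centers.append((x_center, y_center))
--
--             # Classify as border or salient
--             if i == 0 or i == num_tiles_x - 1 or j == 0 or j == num_tiles_y - 1:
--                 border_centers.append((x_center, y_center))
--             else:
--                 salient_centers.append((x_center, y_center))
--
--     return centers, border_centers, salient_centers
-- ===== SOURCE B (Python) =====
-- def generate_tile_centers_border_and_salient(frame_width, frame_height, tile_width=640, tile_height=640):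
--     nx = (frame_width + tile_width - 1) // tile_width
--     ny = (frame_height + tile_height - 1) // tile_height
--     if ny <= 0:
--         return [], [], []
--     step_x = (frame_width - tile_width) // max(nx - 1, 1)
--     step_y = (frame_height - tile_height) // max(ny - 1, 1)
--
--     xs = [min(tile_width // 2 + i * step_x, frame_width - tile_width // 2) for i in range(nx)]
--     ys = [min(tile_height // 2 + j * step_y, frame_height - tile_height // 2) for j in range(ny)]
--
--     centers = [(x, y) for y in ys for x in xs]
--
--     # Border/salient built as closed-form block concatenations of cartesian
--     # products over coordinate slices -- no classification loop at all.
--     edge_x = xs[:1] + xs[1:][-1:]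
--     top = [(x, y) for y in ys[:1] for x in xs]
--     bottom = [(x, y) for y in ys[1:][-1:] for x in xs]
--     sides = [(x, y) for y in ys[1:-1] for x in edge_x]
--     salient = [(x, y) for y in ys[1:-1] for x in xs[1:-1]]
--
--     return centers, top + sides + bottom, salient
-- ===== Notes on version B (the rewrite author's own statement) =====
-- stated objective: alternative
-- what changed: Replaces A's nested-loop per-cell four-condition classification by closed-form block construction: border is assembled as top row ++ interior side columns ++ bottom row, and salient as the cartesian product of the interior coordinate slices, with no classification test at all.
import Mathlib
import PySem

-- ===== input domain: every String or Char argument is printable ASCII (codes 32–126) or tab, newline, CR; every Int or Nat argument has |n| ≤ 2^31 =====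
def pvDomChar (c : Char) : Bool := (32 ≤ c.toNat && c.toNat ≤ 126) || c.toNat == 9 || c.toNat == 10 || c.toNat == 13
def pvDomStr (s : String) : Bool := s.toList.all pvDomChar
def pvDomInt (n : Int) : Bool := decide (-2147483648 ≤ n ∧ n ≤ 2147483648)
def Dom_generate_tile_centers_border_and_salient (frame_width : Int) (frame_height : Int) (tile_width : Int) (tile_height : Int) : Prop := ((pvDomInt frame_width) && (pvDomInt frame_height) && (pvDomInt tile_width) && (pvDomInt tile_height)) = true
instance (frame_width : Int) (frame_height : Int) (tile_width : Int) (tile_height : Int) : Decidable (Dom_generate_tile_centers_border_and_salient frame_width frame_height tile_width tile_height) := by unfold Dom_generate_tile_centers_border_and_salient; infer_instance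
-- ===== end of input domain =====

-- B drops A's per-cell four-condition classification loop entirely: border and salient
-- are assembled as closed-form block concatenations of cartesian products over
-- coordinate-list slices (top row ++ interior side columns ++ bottom row; interior
-- product for salient). Objective: alternative decomposition, same cost.

-- ===== PORT A =====
def generate_tile_centers_border_and_salient (frame_width : Int) (frame_height : Int) (tile_width : Int) (tile_height : Int) : (List (Int × Int)) × (List (Int × Int)) × (List (Int × Int)) :=
  let num_tiles_x := PySem.Int.floordiv (frame_width + tile_width - 1) tile_width
  let num_tiles_y := PySem.Int.floordiv (frame_height + tile_height - 1) tile_height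
  let step_x := PySem.Int.floordiv (frame_width - tile_width) (max (num_tiles_x - 1) 1)
  let step_y := PySem.Int.floordiv (frame_height - tile_height) (max (num_tiles_y - 1) 1)
  (PySem.List.pyRange 0 num_tiles_y 1).foldl (fun st j =>
    (PySem.List.pyRange 0 num_tiles_x 1).foldl (fun st i =>
      let x_center := min (PySem.Int.floordiv tile_width 2 + i * step_x) (frame_width - PySem.Int.floordiv tile_width 2)
      let y_center := min (PySem.Int.floordiv tile_height 2 + j * step_y) (frame_height - PySem.Int.floordiv tile_height 2)
      let st := (st.1 ++ [(x_center, y_center)], st.2.1, st.2.2)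
      if i = 0 ∨ i = num_tiles_x - 1 ∨ j = 0 ∨ j = num_tiles_y - 1 then
        (st.1, st.2.1 ++ [(x_center, y_center)], st.2.2)
      else
        (st.1, st.2.1, st.2.2 ++ [(x_center, y_center)])) st) (([], [], []) : (List (Int × Int)) × (List (Int × Int)) × (List (Int × Int)))

-- ===== PORT B =====
def generate_tile_centers_border_and_salient_alt (frame_width : Int) (frame_height : Int) (tile_width : Int) (tile_height : Int) : (List (Int × Int)) × (List (Int × Int)) × (List (Int × Int)) :=
  let nx := PySem.Int.floordiv (frame_width + tile_width - 1) tile_width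
  let ny := PySem.Int.floordiv (frame_height + tile_height - 1) tile_height
  if ny ≤ 0 then ([], [], []) else
  let step_x := PySem.Int.floordiv (frame_width - tile_width) (max (nx - 1) 1)
  let step_y := PySem.Int.floordiv (frame_height - tile_height) (max (ny - 1) 1)
  let xs := (PySem.List.pyRange 0 nx 1).map (fun i => min (PySem.Int.floordiv tile_width 2 + i * step_x) (frame_width - PySem.Int.floordiv tile_width 2))
  let ys := (PySem.List.pyRange 0 ny 1).map (fun j => min (PySem.Int.floordiv tile_height 2 + j * step_y) (frame_height - PySem.Int.floordiv tile_height 2))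
  let centers := ys.flatMap (fun y => xs.map (fun x => (x, y)))
  let edge_x := PySem.List.slice xs none (some 1) ++ PySem.List.slice (PySem.List.slice xs (some 1) none) (some (-1)) none
  let top := (PySem.List.slice ys none (some 1)).flatMap (fun y => xs.map (fun x => (x, y)))
  let bottom := (PySem.List.slice (PySem.List.slice ys (some 1) none) (some (-1)) none).flatMap (fun y => xs.map (fun x => (x, y)))
  let sides := (PySem.List.slice ys (some 1) (some (-1))).flatMap (fun y => edge_x.map (fun x => (x, y)))
  let salient := (PySem.List.slice ys (some 1) (some (-1))).flatMap (fun y => (PySem.List.slice xs (some 1) (some (-1))).map (fun x => (x, y)))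
  (centers, top ++ sides ++ bottom, salient)

-- ===== PRECONDITION & SPEC =====
-- Pre_ excludes exactly tile_width = 0 or tile_height = 0, where A raises ZeroDivisionError (so does B).
def Pre_generate_tile_centers_border_and_salient (frame_width : Int) (frame_height : Int) (tile_width : Int) (tile_height : Int) : Prop := tile_width ≠ 0 ∧ tile_height ≠ 0
instance (frame_width : Int) (frame_height : Int) (tile_width : Int) (tile_height : Int) : Decidable (Pre_generate_tile_centers_border_and_salient frame_width frame_height tile_width tile_height) := by unfold Pre_generate_tile_centers_border_and_salient; infer_instance
def pvWitness_generate_tile_centers_border_and_salient : Int × Int × Int × Int := (5, 4, 2, 2)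

def Spec_generate_tile_centers_border_and_salient (frame_width : Int) (frame_height : Int) (tile_width : Int) (tile_height : Int) (out : (List (Int × Int)) × (List (Int × Int)) × (List (Int × Int))) : Prop := out = generate_tile_centers_border_and_salient_alt frame_width frame_height tile_width tile_height
instance (frame_width : Int) (frame_height : Int) (tile_width : Int) (tile_height : Int) (out : (List (Int × Int)) × (List (Int × Int)) × (List (Int × Int))) : Decidable (Spec_generate_tile_centers_border_and_salient frame_width frame_height tile_width tile_height out) := by unfold Spec_generate_tile_centers_border_and_salient; infer_instance

-- ===== CLAIM (what is proved, stated in full; the proofs are below) =====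
def Claim_equal_generate_tile_centers_border_and_salient : Prop := ∀ (frame_width : Int) (frame_height : Int) (tile_width : Int) (tile_height : Int), Dom_generate_tile_centers_border_and_salient frame_width frame_height tile_width tile_height → Pre_generate_tile_centers_border_and_salient frame_width frame_height tile_width tile_height → Spec_generate_tile_centers_border_and_salient frame_width frame_height tile_width tile_height (generate_tile_centers_border_and_salient frame_width frame_height tile_width tile_height)

-- ===== LEMMAS AND PROOFS =====

-- l[1:-1] is tail-then-dropLast.
theorem pv_slice_one_neg_one {α : Type} (l : List α) :
    PySem.List.slice l (some 1) (some (-1)) = l.tail.dropLast := by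
  simp [PySem.List.slice, PySem.List.clampIdx]
  rcases l with _ | ⟨a, l⟩
  · simp
  · simp [List.dropLast_eq_take]

-- l[:1] is take 1.
theorem pv_slice_to_one {α : Type} (l : List α) :
    PySem.List.slice l none (some 1) = l.take 1 := by
  rw [PySem.List.slice_to l (by norm_num : (0:Int) ≤ 1)]
  norm_num

-- range(0,n) split into first element, middle, last element, for n ≥ 2.
theorem pv_range_split (n : Int) (h : 2 ≤ n) :
    PySem.List.pyRange 0 n 1 = 0 :: (PySem.List.pyRange 1 (n - 1) 1 ++ [n - 1]) := by
  have h1 : PySem.List.pyRange 0 n 1 = 0 :: PySem.List.pyRange 1 n 1 :=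
    PySem.List.pyRange_one_cons (by omega)
  have h2 : PySem.List.pyRange 1 n 1 = PySem.List.pyRange 1 (n - 1) 1 ++ PySem.List.pyRange (n - 1) n 1 :=
    PySem.List.pyRange_one_append 1 (n - 1) n (by omega) (by omega)
  have h3 : PySem.List.pyRange (n - 1) n 1 = [n - 1] := by
    rw [PySem.List.pyRange_one]
    have : (n - (n - 1)).toNat = 1 := by omega
    rw [this]
    simp
  rw [h1, h2, h3]

theorem pv_range_one : PySem.List.pyRange 0 1 1 = [0] := by
  have := PySem.List.pyRange_one_singleton (0 : Int)
  simpa using this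

-- All elements of the middle range are strictly interior.
theorem pv_mem_mid (n j : Int) (hj : j ∈ PySem.List.pyRange 1 (n - 1) 1) : j ≠ 0 ∧ j ≠ n - 1 := by
  rw [PySem.List.mem_pyRange_one] at hj
  omega

-- The border filter over a full row keeps exactly the two edge indices.
theorem pv_filter_edge (nx : Int) (h : 2 ≤ nx) :
    (PySem.List.pyRange 0 nx 1).filter (fun i => decide (i = 0 ∨ i = nx - 1)) = [0, nx - 1] := by
  rw [pv_range_split nx h, List.filter_cons, List.filter_append]
  have hfM : (PySem.List.pyRange 1 (nx - 1) 1).filter (fun i => decide (i = 0 ∨ i = nx - 1)) = [] := by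
    rw [List.filter_eq_nil_iff]
    intro i hi
    simpa using pv_mem_mid nx i hi
  rw [hfM]
  simp

-- The salient filter over a full row keeps exactly the interior indices.
theorem pv_filter_mid (nx : Int) (h : 2 ≤ nx) :
    (PySem.List.pyRange 0 nx 1).filter (fun i => !decide (i = 0 ∨ i = nx - 1)) = PySem.List.pyRange 1 (nx - 1) 1 := by
  rw [pv_range_split nx h, List.filter_cons, List.filter_append]
  have hfM : (PySem.List.pyRange 1 (nx - 1) 1).filter (fun i => !decide (i = 0 ∨ i = nx - 1)) = PySem.List.pyRange 1 (nx - 1) 1 := by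
    rw [List.filter_eq_self]
    intro i hi
    have := pv_mem_mid nx i hi
    simp [this.1, this.2]
  rw [hfM]
  simp

-- A's inner (per-row) fold: appends the whole row to centers and splits it by the border filter.
theorem pv_inner (fx fy : Int → Int) (nx ny j : Int) (l : List Int)
    (st : List (Int × Int) × List (Int × Int) × List (Int × Int)) :
    l.foldl (fun st i =>
      let x_center := fx i
      let y_center := fy j
      let st := (st.1 ++ [(x_center, y_center)], st.2.1, st.2.2)
      if i = 0 ∨ i = nx - 1 ∨ j = 0 ∨ j = ny - 1 then
        (st.1, st.2.1 ++ [(x_center, y_center)], st.2.2)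
      else
        (st.1, st.2.1, st.2.2 ++ [(x_center, y_center)])) st
    = (st.1 ++ l.map (fun i => (fx i, fy j)),
       st.2.1 ++ (l.filter (fun i => decide (i = 0 ∨ i = nx - 1 ∨ j = 0 ∨ j = ny - 1))).map (fun i => (fx i, fy j)),
       st.2.2 ++ (l.filter (fun i => !decide (i = 0 ∨ i = nx - 1 ∨ j = 0 ∨ j = ny - 1))).map (fun i => (fx i, fy j))) := by
  induction l generalizing st with
  | nil => simp
  | cons a l ih =>
    simp only [List.foldl_cons, List.map_cons, List.filter_cons]
    by_cases hp : a = 0 ∨ a = nx - 1 ∨ j = 0 ∨ j = ny - 1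
    · simp [hp, ih]
    · simp [hp, ih]

-- A's outer fold: the three result lists as flatMaps over the row indices.
theorem pv_outer (fx fy : Int → Int) (nx ny : Int) (l : List Int)
    (st : List (Int × Int) × List (Int × Int) × List (Int × Int)) :
    l.foldl (fun st j =>
      (PySem.List.pyRange 0 nx 1).foldl (fun st i =>
        let x_center := fx i
        let y_center := fy j
        let st := (st.1 ++ [(x_center, y_center)], st.2.1, st.2.2)
        if i = 0 ∨ i = nx - 1 ∨ j = 0 ∨ j = ny - 1 then
          (st.1, st.2.1 ++ [(x_center, y_center)], st.2.2)
        else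
          (st.1, st.2.1, st.2.2 ++ [(x_center, y_center)])) st) st
    = (st.1 ++ l.flatMap (fun j => (PySem.List.pyRange 0 nx 1).map (fun i => (fx i, fy j))),
       st.2.1 ++ l.flatMap (fun j => ((PySem.List.pyRange 0 nx 1).filter (fun i => decide (i = 0 ∨ i = nx - 1 ∨ j = 0 ∨ j = ny - 1))).map (fun i => (fx i, fy j))),
       st.2.2 ++ l.flatMap (fun j => ((PySem.List.pyRange 0 nx 1).filter (fun i => !decide (i = 0 ∨ i = nx - 1 ∨ j = 0 ∨ j = ny - 1))).map (fun i => (fx i, fy j)))) := by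
  induction l generalizing st with
  | nil => simp
  | cons a l ih =>
    rw [List.foldl_cons, pv_inner, ih]
    simp [List.flatMap_cons, List.append_assoc]

-- For interior rows, B's first-element/last-element slices equal A's border filter.
theorem pv_row_border (c : Int → Int × Int) (nx : Int) :
    (((PySem.List.pyRange 0 nx 1).map c).take 1)
      ++ (((PySem.List.pyRange 0 nx 1).map c).tail).drop ((((PySem.List.pyRange 0 nx 1).map c).tail).length - 1)
    = ((PySem.List.pyRange 0 nx 1).filter (fun i => decide (i = 0 ∨ i = nx - 1))).map c := by
  rcases lt_trichotomy nx 1 with h | h | h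
  · rw [PySem.List.pyRange_one_eq_nil (by omega)]
    simp
  · subst h
    rw [pv_range_one]
    simp
  · rw [pv_filter_edge nx (by omega), pv_range_split nx (by omega)]
    simp only [List.map_cons, List.map_append, List.take_succ_cons, List.take_zero,
      List.tail_cons, List.length_append, List.length_map, List.length_cons, List.length_nil]
    simp

-- For interior rows, B's row[1:-1] equals A's salient filter.
theorem pv_row_salient (c : Int → Int × Int) (nx : Int) :
    (((PySem.List.pyRange 0 nx 1).map c).tail).dropLast
    = ((PySem.List.pyRange 0 nx 1).filter (fun i => !decide (i = 0 ∨ i = nx - 1))).map c := by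
  rcases lt_trichotomy nx 1 with h | h | h
  · rw [PySem.List.pyRange_one_eq_nil (by omega)]
    simp
  · subst h
    rw [pv_range_one]
    simp
  · rw [pv_filter_mid nx (by omega), pv_range_split nx (by omega)]
    simp

-- The generalized equivalence, over arbitrary coordinate functions and tile counts.
theorem pv_main (fx fy : Int → Int) (nx ny : Int) :
    (PySem.List.pyRange 0 ny 1).foldl (fun st j =>
      (PySem.List.pyRange 0 nx 1).foldl (fun st i =>
        let x_center := fx i
        let y_center := fy j
        let st := (st.1 ++ [(x_center, y_center)], st.2.1, st.2.2)
        if i = 0 ∨ i = nx - 1 ∨ j = 0 ∨ j = ny - 1 then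
          (st.1, st.2.1 ++ [(x_center, y_center)], st.2.2)
        else
          (st.1, st.2.1, st.2.2 ++ [(x_center, y_center)])) st)
      (([], [], []) : (List (Int × Int)) × (List (Int × Int)) × (List (Int × Int)))
    = (if ny ≤ 0 then ([], [], []) else
       let xs := (PySem.List.pyRange 0 nx 1).map fx
       let ys := (PySem.List.pyRange 0 ny 1).map fy
       let centers := ys.flatMap (fun y => xs.map (fun x => (x, y)))
       let edge_x := PySem.List.slice xs none (some 1) ++ PySem.List.slice (PySem.List.slice xs (some 1) none) (some (-1)) none
       let top := (PySem.List.slice ys none (some 1)).flatMap (fun y => xs.map (fun x => (x, y)))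
       let bottom := (PySem.List.slice (PySem.List.slice ys (some 1) none) (some (-1)) none).flatMap (fun y => xs.map (fun x => (x, y)))
       let sides := (PySem.List.slice ys (some 1) (some (-1))).flatMap (fun y => edge_x.map (fun x => (x, y)))
       let salient := (PySem.List.slice ys (some 1) (some (-1))).flatMap (fun y => (PySem.List.slice xs (some 1) (some (-1))).map (fun x => (x, y)))
       (centers, top ++ sides ++ bottom, salient)) := by
  by_cases hny : ny ≤ 0
  · rw [if_pos hny, PySem.List.pyRange_one_eq_nil hny]
    simp
  rw [if_neg hny]
  rw [pv_outer]
  simp only [List.nil_append, pv_slice_to_one, PySem.List.slice_from_one,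
    PySem.List.slice_from_neg_one, pv_slice_one_neg_one]
  refine Prod.ext ?_ (Prod.ext ?_ ?_)
  · -- centers
    simp [List.flatMap_map, List.map_map, Function.comp_def]
  · -- border
    rcases lt_trichotomy ny 1 with h | h | h
    · rw [show PySem.List.pyRange 0 ny 1 = [] from PySem.List.pyRange_one_eq_nil (by omega)]
      simp
    · subst h
      rw [pv_range_one]
      simp [List.map_map, Function.comp_def]
    · rw [pv_range_split ny (by omega)]
      simp only [List.map_cons, List.map_nil, List.map_append, List.tail_cons,
        List.dropLast_concat, List.take_succ_cons, List.take_zero, List.flatMap_cons,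
        List.flatMap_append, List.flatMap_singleton, List.flatMap_nil, List.append_nil,
        List.flatMap_map]
      have hbot : (List.map fy (PySem.List.pyRange 1 (ny - 1) 1) ++ [fy (ny - 1)]).drop
          ((List.map fy (PySem.List.pyRange 1 (ny - 1) 1) ++ [fy (ny - 1)]).length - 1) = [fy (ny - 1)] := by
        have : (List.map fy (PySem.List.pyRange 1 (ny - 1) 1) ++ [fy (ny - 1)]).length - 1
            = (List.map fy (PySem.List.pyRange 1 (ny - 1) 1)).length := by simp
        rw [this, List.drop_left]
      rw [hbot]
      simp only [List.flatMap_cons, List.flatMap_nil, List.append_nil]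
      rw [← List.append_assoc]
      congr 1
      congr 1
      · -- top row
        rw [List.filter_eq_self.mpr (by intro i _; simp)]
        simp [List.map_map, Function.comp_def]
      · -- interior rows
        refine List.flatMap_congr ?_
        intro j hj
        have hjm := pv_mem_mid ny j hj
        have hflt : (PySem.List.pyRange 0 nx 1).filter (fun i => decide (i = 0 ∨ i = nx - 1 ∨ j = 0 ∨ j = ny - 1))
            = (PySem.List.pyRange 0 nx 1).filter (fun i => decide (i = 0 ∨ i = nx - 1)) := by
          refine List.filter_congr ?_
          intro i _
          simp [hjm.1, hjm.2]
        rw [hflt, ← pv_row_border (fun i => (fx i, fy j)) nx]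
        simp [List.map_take, List.map_drop, List.map_map, Function.comp_def]
      · -- bottom row
        rw [List.filter_eq_self.mpr (by intro i _; simp)]
        simp [List.map_map, Function.comp_def]
  · -- salient
    rcases lt_trichotomy ny 1 with h | h | h
    · rw [show PySem.List.pyRange 0 ny 1 = [] from PySem.List.pyRange_one_eq_nil (by omega)]
      simp
    · subst h
      rw [pv_range_one]
      simp
    · rw [pv_range_split ny (by omega)]
      simp only [List.map_cons, List.map_nil, List.map_append, List.tail_cons,
        List.dropLast_concat, List.flatMap_cons, List.flatMap_append,
        List.flatMap_nil, List.append_nil, List.flatMap_map]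
      have h0 : (PySem.List.pyRange 0 nx 1).filter (fun i => !decide (i = 0 ∨ i = nx - 1 ∨ True ∨ (0:Int) = ny - 1)) = [] := by
        rw [List.filter_eq_nil_iff]
        intro i _
        simp
      have hL : (PySem.List.pyRange 0 nx 1).filter (fun i => !decide (i = 0 ∨ i = nx - 1 ∨ ny - 1 = 0 ∨ True)) = [] := by
        rw [List.filter_eq_nil_iff]
        intro i _
        simp
      rw [h0, hL]
      simp only [List.map_nil, List.nil_append, List.append_nil]
      refine List.flatMap_congr ?_
      intro j hj
      have hjm := pv_mem_mid ny j hj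
      have hflt : (PySem.List.pyRange 0 nx 1).filter (fun i => !decide (i = 0 ∨ i = nx - 1 ∨ j = 0 ∨ j = ny - 1))
          = (PySem.List.pyRange 0 nx 1).filter (fun i => !decide (i = 0 ∨ i = nx - 1)) := by
        refine List.filter_congr ?_
        intro i _
        simp [hjm.1, hjm.2]
      rw [hflt, ← pv_row_salient (fun i => (fx i, fy j)) nx]
      simp [List.map_dropLast, List.map_tail, List.map_map, Function.comp_def]

-- ===== VERDICT (by name: the statement is the Claim_ definition above) =====
theorem generate_tile_centers_border_and_salient_spec : Claim_equal_generate_tile_centers_border_and_salient := by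
  intro frame_width frame_height tile_width tile_height _ _
  unfold Spec_generate_tile_centers_border_and_salient generate_tile_centers_border_and_salient generate_tile_centers_border_and_salient_alt
  exact pv_main
    (fun i => min (PySem.Int.floordiv tile_width 2 + i * PySem.Int.floordiv (frame_width - tile_width) (max (PySem.Int.floordiv (frame_width + tile_width - 1) tile_width - 1) 1)) (frame_width - PySem.Int.floordiv tile_width 2))
    (fun j => min (PySem.Int.floordiv tile_height 2 + j * PySem.Int.floordiv (frame_height - tile_height) (max (PySem.Int.floordiv (frame_height + tile_height - 1) tile_height - 1) 1)) (frame_height - PySem.Int.floordiv tile_height 2))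
    (PySem.Int.floordiv (frame_width + tile_width - 1) tile_width)
    (PySem.Int.floordiv (frame_height + tile_height - 1) tile_height)
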